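-- pv_equiv track=rewrite | github.com/daniel-gonzalez-cedre/2024_fall_principles-of-computing | lectures/lecture06/lecture06.py | replace_words_first_char
-- ===== SOURCE A (Python) =====
-- def replace_words_first_char(string):
--   begin_word = True
--   result = ""
--
--   for char in string:
--     if char == " ":
--       begin_word = True
--       result += char
--     else:
--       if begin_word:
--         result += "?"
--         begin_word = False
--       else:
--         result += char
--
--   return result
-- ===== SOURCE B (Python) =====
-- def replace_words_first_char(string):
--     return " ".join("?" + w[1:] if w else w for w in string.split(" "))
-- ===== Notes on version B (the rewrite author's own statement) =====
-- stated objective: idiomatic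
-- what changed: Replaces the char-by-char begin_word state machine (which builds the result by repeated string concatenation) with a tokenize-transform-join pass: split on single spaces, replace the first character of each nonempty token with a question mark, and join with spaces.
import Mathlib
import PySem

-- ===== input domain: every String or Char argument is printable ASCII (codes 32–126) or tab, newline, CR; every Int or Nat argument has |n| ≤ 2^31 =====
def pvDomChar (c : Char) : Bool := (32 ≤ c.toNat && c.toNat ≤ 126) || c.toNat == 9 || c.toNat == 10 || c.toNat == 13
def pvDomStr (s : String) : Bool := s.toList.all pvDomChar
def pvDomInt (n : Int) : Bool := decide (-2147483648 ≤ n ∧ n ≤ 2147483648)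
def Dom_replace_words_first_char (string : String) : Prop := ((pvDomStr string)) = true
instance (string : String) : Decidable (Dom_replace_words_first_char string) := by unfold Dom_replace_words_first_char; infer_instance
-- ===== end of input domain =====

-- B rewrites A's char-by-char begin_word state machine as an idiomatic split/transform/join over single-space tokens; same cost, proved equal on all inputs.

-- ===== PORT A =====
-- literal transliteration of A: fold over the characters with state (begin_word, result)
def replace_words_first_char (string : String) : String :=
  String.mk
    (string.toList.foldl
      (fun (st : Bool × List Char) c =>
        if c = ' ' then (true, st.2 ++ [c])
        else if st.1 then (false, st.2 ++ ['?'])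
        else (st.1, st.2 ++ [c]))
      (true, [])).2

-- ===== PORT B =====
-- literal transliteration of Source B: " ".join("?" + w[1:] if w else w for w in string.split(" "))
def replace_words_first_char_alt (string : String) : String :=
  String.mk (PySem.Chars.join [' ']
    ((PySem.Chars.splitOn string.toList [' ']).map
      (fun w => if w = [] then w else '?' :: PySem.List.slice w (some 1) none)))

-- ===== PRECONDITION & SPEC =====
def Spec_replace_words_first_char (string : String) (out : String) : Prop := out = replace_words_first_char_alt string
instance (string : String) (out : String) : Decidable (Spec_replace_words_first_char string out) := by unfold Spec_replace_words_first_char; infer_instance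

-- ===== CLAIM (what is proved, stated in full; the proofs are below) =====
def Claim_equal_replace_words_first_char : Prop := ∀ (string : String), Dom_replace_words_first_char string → Spec_replace_words_first_char string (replace_words_first_char string)

-- ===== LEMMAS AND PROOFS =====

-- structural form of A's loop
def pvFA : List Char → Bool → List Char
  | [], _ => []
  | c :: rest, bw =>
    if c = ' ' then c :: pvFA rest true
    else (if bw then '?' else c) :: pvFA rest false

-- structural form of single-space split with the current (reversed) token as state
def pvSp : List Char → List Char → List (List Char)
  | [], cur => [cur.reverse]
  | c :: rest, cur => if c = ' ' then cur.reverse :: pvSp rest [] else pvSp rest (c :: cur)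

lemma pvSp_ne_nil (l : List Char) : ∀ cur, pvSp l cur ≠ [] := by
  induction l with
  | nil => intro cur; simp [pvSp]
  | cons c rest ih =>
    intro cur
    by_cases h : c = ' ' <;> simp [pvSp, h]
    exact ih (c :: cur)

lemma pvGo_eq_sp : ∀ (fuel : Nat) (l cur : List Char) (acc : List (List Char)), l.length < fuel →
    PySem.Chars.splitOn.go [' '] fuel l cur acc = acc.reverse ++ pvSp l cur := by
  intro fuel
  induction fuel with
  | zero => intro l cur acc h; omega
  | succ f ih =>
    intro l cur acc h
    cases l with
    | nil =>
      have hgo : PySem.Chars.splitOn.go [' '] (f + 1) [] cur acc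
          = (cur.reverse :: acc).reverse := rfl
      rw [hgo]; simp [pvSp]
    | cons c rest =>
      have hgo : PySem.Chars.splitOn.go [' '] (f + 1) (c :: rest) cur acc
          = if [' '].isPrefixOf (c :: rest) then
              PySem.Chars.splitOn.go [' '] f rest [] (cur.reverse :: acc)
            else PySem.Chars.splitOn.go [' '] f rest (c :: cur) acc := rfl
      rw [hgo]
      simp only [List.length_cons] at h
      by_cases hc : c = ' '
      · subst hc
        rw [if_pos (by simp [List.isPrefixOf])]
        rw [ih _ _ _ (Nat.lt_of_succ_lt_succ h)]
        simp [pvSp]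
      · rw [if_neg (by simp [List.isPrefixOf]; intro hh; exact hc hh.symm)]
        rw [ih rest (c :: cur) acc (Nat.lt_of_succ_lt_succ h)]
        simp [pvSp, hc]

lemma pvSplitOn_eq (l : List Char) : PySem.Chars.splitOn l [' '] = pvSp l [] := by
  unfold PySem.Chars.splitOn
  rw [pvGo_eq_sp (l.length + 1) l [] [] (by omega)]
  simp

-- A's foldl accumulates onto the result; its tail is pvFA
lemma pvFoldA (l : List Char) : ∀ (bw : Bool) (acc : List Char),
    (l.foldl (fun (st : Bool × List Char) c =>
      if c = ' ' then (true, st.2 ++ [c])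
      else if st.1 then (false, st.2 ++ ['?'])
      else (st.1, st.2 ++ [c])) (bw, acc)).2 = acc ++ pvFA l bw := by
  induction l with
  | nil => intro bw acc; simp [pvFA]
  | cons c rest ih =>
    intro bw acc
    by_cases hc : c = ' '
    · simp [List.foldl, hc, pvFA, ih]
    · cases bw <;> simp [List.foldl, hc, pvFA, ih]

-- the token transform used by B
def pvTr (w : List Char) : List Char := if w = [] then w else '?' :: PySem.List.slice w (some 1) none

lemma pvSlice_one (w : List Char) : PySem.List.slice w (some 1) none = w.drop 1 := by
  rw [PySem.List.slice_from_one]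
  cases w <;> simp

lemma pvTr_append (x : List Char) (hx : x ≠ []) (c : Char) : pvTr (x ++ [c]) = pvTr x ++ [c] := by
  unfold pvTr
  rw [if_neg (by simp), if_neg hx]
  rw [pvSlice_one, pvSlice_one, List.drop_append_of_le_length]
  · simp
  · cases x with
    | nil => exact absurd rfl hx
    | cons a t => simp

lemma pvJoin_sp (l : List Char) : ∀ cur : List Char,
    PySem.Chars.join [' '] ((pvSp l cur).map pvTr)
      = (if cur = [] then [] else pvTr cur.reverse) ++ pvFA l cur.isEmpty := by
  induction l with
  | nil =>
    intro cur
    cases cur <;> simp [pvSp, pvFA, PySem.Chars.join, pvTr, List.intercalate]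
  | cons c rest ih =>
    intro cur
    by_cases hc : c = ' '
    · subst hc
      have hne := pvSp_ne_nil rest []
      obtain ⟨w, ws, hws⟩ : ∃ w ws, pvSp rest [] = w :: ws := by
        cases h : pvSp rest [] with
        | nil => exact absurd h hne
        | cons w ws => exact ⟨w, ws, rfl⟩
      have ihr := ih ([] : List Char)
      rw [hws] at ihr
      simp only [List.isEmpty_nil] at ihr
      have hsp : pvSp (' ' :: rest) cur = cur.reverse :: pvSp rest [] := by simp [pvSp]
      rw [hsp, hws, List.map_cons, List.map_cons, PySem.Chars.join_cons_cons, ← List.map_cons, ihr]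
      cases cur with
      | nil => simp [pvFA, pvTr]
      | cons d cs => simp [pvFA]
    · have ihr := ih (c :: cur)
      simp only [pvSp, if_neg hc] at ihr ⊢
      rw [ihr]
      cases cur with
      | nil =>
        simp [pvFA, hc, pvTr, pvSlice_one]
      | cons d cs =>
        have hx : ((d :: cs).reverse : List Char) ≠ [] := by simp
        have : ((c :: d :: cs).reverse : List Char) = (d :: cs).reverse ++ [c] := by simp
        rw [this, pvTr_append _ hx]
        simp [pvFA, hc]

-- ===== VERDICT (by name: the statement is the Claim_ definition above) =====
theorem replace_words_first_char_spec : Claim_equal_replace_words_first_char := by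
  intro s _
  unfold Spec_replace_words_first_char replace_words_first_char replace_words_first_char_alt
  rw [pvFoldA, pvSplitOn_eq]
  have h := pvJoin_sp s.toList []
  simp only [List.isEmpty_nil] at h
  have hmap : (pvSp s.toList []).map
      (fun w => if w = [] then w else '?' :: PySem.List.slice w (some 1) none)
      = (pvSp s.toList []).map pvTr := by
    apply List.map_congr_left; intro w _; rfl
  simp [hmap, h]
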